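-- pv_equiv track=rewrite | github.com/Bartosz-Wegrzyn/Python-exercises-for-noobs | Task 29.py | make_full_colum
-- ===== SOURCE A (Python) =====
-- def make_full_colum(board_size, x_or_o, col):
--     c = ""
--
--     if x_or_o == 1:
--         x_or_o = "x"
--     elif x_or_o == 2:
--         x_or_o = "o"
--     else:
--         x_or_o = " "
--
--     for column in range(board_size):
--             if column == col:
--                 c += f"| {x_or_o} "
--             else:
--                 c += f"|   "
--
--     c += "|"
--     return c
-- ===== SOURCE B (Python) =====
-- def make_full_colum(board_size, x_or_o, col):
--     # Build the fully-empty row once, then patch a single character in place.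
--     mark = {1: "x", 2: "o"}.get(x_or_o, " ")
--     base = "|   " * board_size + "|"
--     if 0 <= col < board_size:
--         pos = 4 * col + 2
--         return base[:pos] + mark + base[pos + 1:]
--     return base
-- ===== Notes on version B (the rewrite author's own statement) =====
-- stated objective: simpler
-- what changed: Replaces the per-column branching loop with a closed-form construction: the all-empty row is built once by string repetition and the mark is patched in at character index 4*col+2 by one slice splice.
import Mathlib
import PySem

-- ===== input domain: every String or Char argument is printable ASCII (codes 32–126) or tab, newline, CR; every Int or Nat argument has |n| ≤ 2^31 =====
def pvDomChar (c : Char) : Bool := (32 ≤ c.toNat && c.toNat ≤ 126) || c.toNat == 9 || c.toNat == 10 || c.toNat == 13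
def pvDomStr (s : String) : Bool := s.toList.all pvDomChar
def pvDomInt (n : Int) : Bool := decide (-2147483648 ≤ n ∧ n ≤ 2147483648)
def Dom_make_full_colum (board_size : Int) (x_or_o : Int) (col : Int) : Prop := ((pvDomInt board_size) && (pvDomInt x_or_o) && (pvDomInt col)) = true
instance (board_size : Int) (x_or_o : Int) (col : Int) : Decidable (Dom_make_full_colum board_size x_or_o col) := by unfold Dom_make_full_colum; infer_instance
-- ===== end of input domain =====

-- B builds the all-empty row once and patches the mark in by one slice splice, instead of A's
-- per-column branching loop; objective: simpler (same O(board_size) cost).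

-- ===== PORT A =====
def make_full_colum (board_size : Int) (x_or_o : Int) (col : Int) : String :=
  let mark : String := if x_or_o = 1 then "x" else if x_or_o = 2 then "o" else " "
  ((PySem.List.pyRange 0 board_size 1).foldl
      (fun c column => c ++ (if column = col then "| " ++ mark ++ " " else "|   ")) "") ++ "|"

-- ===== PORT B =====
-- Python's string repetition "|   " * board_size is ported as the join of a replicate list
-- (exact: for board_size ≤ 0 Python's result is "" and so is the join of replicate 0).
def make_full_colum_alt (board_size : Int) (x_or_o : Int) (col : Int) : String :=
  let mark : String := PySem.Dict.getD (PySem.Dict.mk [((1:Int), "x"), (2, "o")]) x_or_o " "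
  let base : String := String.join (List.replicate board_size.toNat "|   ") ++ "|"
  if 0 ≤ col ∧ col < board_size then
    PySem.Str.slice base none (some (4 * col + 2)) ++ mark
      ++ PySem.Str.slice base (some (4 * col + 2 + 1)) none
  else base

-- ===== PRECONDITION & SPEC =====
def Spec_make_full_colum (board_size : Int) (x_or_o : Int) (col : Int) (out : String) : Prop := out = make_full_colum_alt board_size x_or_o col
instance (board_size : Int) (x_or_o : Int) (col : Int) (out : String) : Decidable (Spec_make_full_colum board_size x_or_o col out) := by unfold Spec_make_full_colum; infer_instance

-- ===== CLAIM (what is proved, stated in full; the proofs are below) =====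
def Claim_equal_make_full_colum : Prop := ∀ (board_size : Int) (x_or_o : Int) (col : Int), Dom_make_full_colum board_size x_or_o col → Spec_make_full_colum board_size x_or_o col (make_full_colum board_size x_or_o col)

-- ===== LEMMAS AND PROOFS =====

-- the empty cell "|   " and the marked cell "| m " as char lists
def pvCell : List Char := ['|', ' ', ' ', ' ']
def pvCellM (m : List Char) : List Char := '|' :: ' ' :: (m ++ [' '])

lemma pv_foldl_toList {β : Type} (xs : List β) (g : β → String) (s : String) :
    (xs.foldl (fun c x => c ++ g x) s).toList = s.toList ++ xs.flatMap (fun x => (g x).toList) := by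
  induction xs generalizing s with
  | nil => simp
  | cons x xs ih => simp [List.foldl_cons, ih]

lemma pv_mark_eq (x : Int) :
    PySem.Dict.getD (PySem.Dict.mk [((1:Int), "x"), (2, "o")]) x " "
      = (if x = 1 then "x" else if x = 2 then "o" else " ") := by
  by_cases h1 : x = 1
  · subst h1; rfl
  · by_cases h2 : x = 2
    · subst h2; rfl
    · rw [if_neg h1, if_neg h2, PySem.Dict.getD_eq_get?_getD,
          PySem.Dict.get?_mk_cons, if_neg (by simp only [beq_iff_eq]; exact fun h => h1 h.symm),
          PySem.Dict.get?_mk_cons, if_neg (by simp only [beq_iff_eq]; exact fun h => h2 h.symm)]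
      rfl

lemma pv_flatMap_out (j : Nat) (col : Int) (m : List Char)
    (h : ∀ k : Nat, k < j → (k : Int) ≠ col) :
    (List.range j).flatMap (fun k : Nat => if (k : Int) = col then pvCellM m else pvCell)
      = (List.replicate j pvCell).flatten := by
  induction j with
  | zero => simp
  | succ j ih =>
    rw [List.range_succ, List.flatMap_append, ih (fun k hk => h k (by omega)),
        List.replicate_succ' (n := j)]
    simp [h j (by omega)]

lemma pv_flatMap_in (c r : Nat) (m : List Char) :
    (List.range (c + r + 1)).flatMap
        (fun k : Nat => if (k : Int) = (c : Int) then pvCellM m else pvCell)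
      = (List.replicate c pvCell).flatten ++ pvCellM m ++ (List.replicate r pvCell).flatten := by
  induction r with
  | zero =>
    rw [List.range_succ, List.flatMap_append,
        pv_flatMap_out c (c : Int) m (fun k hk => by omega)]
    simp
  | succ r ih =>
    rw [show c + (r + 1) + 1 = (c + r + 1) + 1 from by omega, List.range_succ,
        List.flatMap_append, ih, List.replicate_succ' (n := r)]
    simp only [List.flatMap_cons, List.flatMap_nil, List.append_nil]
    rw [if_neg (by omega : ¬ (((c + r + 1 : Nat) : Int) = (c : Int)))]
    simp [List.flatten_append]

lemma pv_take_base (c r : Nat) :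
    ((List.replicate (c + r + 1) pvCell).flatten ++ ['|']).take (4 * c + 2)
      = (List.replicate c pvCell).flatten ++ ['|', ' '] := by
  induction c with
  | zero => simp [List.replicate_succ, pvCell]
  | succ c ih =>
    rw [show c + 1 + r + 1 = (c + r + 1) + 1 from by omega, List.replicate_succ,
        List.flatten_cons, show 4 * (c + 1) + 2 = 4 * c + 2 + 1 + 1 + 1 + 1 from by omega,
        List.replicate_succ (n := c), List.flatten_cons]
    simp only [pvCell] at ih ⊢
    simp only [List.cons_append, List.nil_append, List.take_succ_cons, ih]

lemma pv_drop_base (c r : Nat) :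
    ((List.replicate (c + r + 1) pvCell).flatten ++ ['|']).drop (4 * c + 2 + 1)
      = ' ' :: ((List.replicate r pvCell).flatten ++ ['|']) := by
  induction c with
  | zero => simp [List.replicate_succ, pvCell]
  | succ c ih =>
    rw [show c + 1 + r + 1 = (c + r + 1) + 1 from by omega, List.replicate_succ,
        List.flatten_cons, show 4 * (c + 1) + 2 + 1 = 4 * c + 2 + 1 + 1 + 1 + 1 + 1 from by omega]
    simp only [pvCell] at ih ⊢
    simp only [List.cons_append, List.nil_append, List.drop_succ_cons, ih]

lemma pv_base_toList (n : Nat) :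
    (String.join (List.replicate n "|   ") ++ "|").toList
      = (List.replicate n pvCell).flatten ++ ['|'] := by
  simp [String.toList_join, List.map_replicate, show "|   ".toList = pvCell from by decide,
        show "|".toList = ['|'] from by decide]

-- ===== VERDICT (by name: the statement is the Claim_ definition above) =====
theorem make_full_colum_spec : Claim_equal_make_full_colum := by
  intro bs x col _
  show make_full_colum bs x col = make_full_colum_alt bs x col
  refine String.toList_inj.mp ?_
  unfold make_full_colum make_full_colum_alt
  rw [pv_mark_eq]
  set m : String := if x = 1 then "x" else if x = 2 then "o" else " " with hm
  simp only [PySem.List.pyRange_one, Int.sub_zero, List.foldl_map]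
  rw [show (fun (c : String) (k : Nat) => c ++ (if (0 : Int) + (k : Int) = col then "| " ++ m ++ " " else "|   "))
        = (fun (c : String) (k : Nat) => c ++ (if (k : Int) = col then "| " ++ m ++ " " else "|   ")) from by
      funext c k; simp]
  have hcells : ∀ k : Nat,
      ((if (k : Int) = col then "| " ++ m ++ " " else "|   ")).toList
        = (if (k : Int) = col then pvCellM m.toList else pvCell) := by
    intro k
    by_cases hk : (k : Int) = col <;>
      simp [hk, pvCellM, pvCell, show "| ".toList = ['|', ' '] from by decide,
            show " ".toList = [' '] from by decide, show "|   ".toList = pvCell from by decide]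
  by_cases hin : 0 ≤ col ∧ col < bs
  · -- in-range: col = c, bs.toNat = c + r + 1
    obtain ⟨h0, h1⟩ := hin
    obtain ⟨c, hc⟩ : ∃ c : Nat, col = (c : Int) := ⟨col.toNat, by omega⟩
    obtain ⟨r, hr⟩ : ∃ r : Nat, bs.toNat = c + r + 1 := ⟨bs.toNat - c - 1, by omega⟩
    simp only [if_pos (⟨h0, h1⟩ : 0 ≤ col ∧ col < bs)]
    rw [String.toList_append, String.toList_append, String.toList_append,
        pv_foldl_toList (List.range bs.toNat) (fun k : Nat => if (k : Int) = col then "| " ++ m ++ " " else "|   ") ""]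
    simp only [PySem.Str.slice, PySem.Chars.slice_eq_listSlice, String.toList_ofList]
    rw [PySem.List.slice_to _ (show (0:Int) ≤ 4 * col + 2 by omega),
        PySem.List.slice_from _ (show (0:Int) ≤ 4 * col + 2 + 1 by omega)]
    rw [pv_base_toList, hr,
        show (4 * col + 2).toNat = 4 * c + 2 from by omega,
        show (4 * col + 2 + 1).toNat = 4 * c + 2 + 1 from by omega,
        pv_take_base, pv_drop_base]
    have : ∀ k : Nat, (fun x_1 : Nat =>
        ((if (x_1 : Int) = col then "| " ++ m ++ " " else "|   ")).toList) k
        = (if (k : Int) = (c : Int) then pvCellM m.toList else pvCell) := by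
      intro k; rw [← hc]; exact hcells k
    rw [List.flatMap_congr (h := fun k _ => this k), pv_flatMap_in c r m.toList]
    simp [pvCellM, show "|".toList = ['|'] from by decide]
  · -- out of range: every cell is the empty cell
    simp only [if_neg hin]
    rw [String.toList_append, pv_foldl_toList (List.range bs.toNat) (fun k : Nat => if (k : Int) = col then "| " ++ m ++ " " else "|   ") "", pv_base_toList]
    have hne : ∀ k : Nat, k < bs.toNat → (k : Int) ≠ col := by
      intro k hk
      rcases not_and_or.mp hin with h | h <;> omega
    have : ∀ k ∈ List.range bs.toNat, (fun x_1 : Nat =>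
        ((if (x_1 : Int) = col then "| " ++ m ++ " " else "|   ")).toList) k
        = (if (k : Int) = col then pvCellM m.toList else pvCell) := fun k _ => hcells k
    rw [List.flatMap_congr (h := this),
        pv_flatMap_out bs.toNat col m.toList hne]
    simp [show "|".toList = ['|'] from by decide]
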